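-- pv_equiv track=rewrite | github.com/tsg-humlab/SL-head-movement-detection | dataset/labels/split_dataset.py | create_signer_groups
-- ===== SOURCE A (Python) =====
-- def create_signer_groups(count_dict):
--     """ Creates a dictionary with the signer id as key and a list of video ids as value """
--     keys = list(count_dict.keys())
--     output = {}
--
--     for key in keys:
--         signer = key.split('_')[-1]
--
--         try:
--             output[signer].append(key)
--         except KeyError:
--             output[signer] = [key]
--
--     return output
-- ===== SOURCE B (Python) =====
-- def create_signer_groups(count_dict):
--     """ Creates a dictionary with the signer id as key and a list of video ids as value """
--     keys = list(count_dict.keys())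
--     signers = list(dict.fromkeys(k.split('_')[-1] for k in keys))
--     return {s: [k for k in keys if k.split('_')[-1] == s] for s in signers}
-- ===== Notes on version B (the rewrite author's own statement) =====
-- stated objective: alternative
-- what changed: Replaces the try/except hash-bucketing loop by a two-pass ordered-dedup of signer ids followed by a per-signer filtering comprehension (dict comprehension instead of incremental mutation).
import Mathlib
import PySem

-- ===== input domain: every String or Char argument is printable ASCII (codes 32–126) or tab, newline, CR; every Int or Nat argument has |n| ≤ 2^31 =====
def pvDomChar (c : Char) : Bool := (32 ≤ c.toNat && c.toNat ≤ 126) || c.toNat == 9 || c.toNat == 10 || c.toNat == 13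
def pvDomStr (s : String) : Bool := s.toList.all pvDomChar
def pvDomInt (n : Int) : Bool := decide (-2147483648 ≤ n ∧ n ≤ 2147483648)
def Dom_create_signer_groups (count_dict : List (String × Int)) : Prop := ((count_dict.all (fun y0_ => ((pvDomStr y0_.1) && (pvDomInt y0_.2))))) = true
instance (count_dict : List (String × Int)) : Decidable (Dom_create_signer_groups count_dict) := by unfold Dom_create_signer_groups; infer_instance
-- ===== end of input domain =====

-- B replaces A's try/except hash-bucketing loop by an ordered dedup of the signer ids
-- followed by a per-signer filter (alternative decomposition; same return value).

-- shared helper: key.split('_')[-1]  (split never returns [], so index -1 always hits)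
def pvSigner (key : String) : String :=
  PySem.List.pyGetD ((PySem.Str.split? key "_").getD []) (-1) ""

-- ===== PORT A =====
def create_signer_groups (count_dict : List (String × Int)) : List (String × List String) :=
  let keys := (PySem.Dict.ofList count_dict).keys
  let output : PySem.Dict String (List String) :=
    keys.foldl (fun output key =>
      let signer := pvSigner key
      -- try: output[signer].append(key)  except KeyError: output[signer] = [key]
      output.insert signer
        (match output.get? signer with
         | some lst => lst ++ [key]
         | none => [key])) PySem.Dict.empty
  output.items

-- ===== PORT B =====
def create_signer_groups_alt (count_dict : List (String × Int)) : List (String × List String) :=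
  let keys := (PySem.Dict.ofList count_dict).keys
  let signers := PySem.List.dedup (keys.map pvSigner)
  signers.map (fun s => (s, keys.filter (fun k => pvSigner k == s)))

-- ===== PRECONDITION & SPEC =====
def Spec_create_signer_groups (count_dict : List (String × Int)) (out : List (String × List String)) : Prop := out = create_signer_groups_alt count_dict
instance (count_dict : List (String × Int)) (out : List (String × List String)) : Decidable (Spec_create_signer_groups count_dict out) := by unfold Spec_create_signer_groups; infer_instance

-- ===== CLAIM (what is proved, stated in full; the proofs are below) =====
def Claim_equal_create_signer_groups : Prop := ∀ (count_dict : List (String × Int)), Dom_create_signer_groups count_dict → Spec_create_signer_groups count_dict (create_signer_groups count_dict)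

-- ===== LEMMAS AND PROOFS =====

-- A's loop step (insert with the try/except value) is exactly a modify-with-default-[]
theorem pv_step_eq_modify (d : PySem.Dict String (List String)) (k : String) (v : String) :
    d.insert k (match d.get? k with | some lst => lst ++ [v] | none => [v])
      = d.modify k [] (· ++ [v]) := by
  simp [PySem.Dict.modify, PySem.Dict.getD_eq_get?_getD]
  cases d.get? k <;> rfl

theorem pv_fold_eq (ks : List String) :
    (ks.foldl (fun (output : PySem.Dict String (List String)) key =>
        output.insert (pvSigner key)
          (match output.get? (pvSigner key) with
           | some lst => lst ++ [key]
           | none => [key])) PySem.Dict.empty).items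
      = (PySem.List.dedup (ks.map pvSigner)).map
          (fun s => (s, ks.filter (fun k => pvSigner k == s))) := by
  have hstep : ∀ (d : PySem.Dict String (List String)),
      ks.foldl (fun output key =>
        output.insert (pvSigner key)
          (match output.get? (pvSigner key) with
           | some lst => lst ++ [key]
           | none => [key])) d
        = (ks.map (fun k => (pvSigner k, k))).foldl
            (fun d p => d.modify p.1 [] (· ++ [p.2])) d := by
    intro d
    rw [List.foldl_map]
    exact PySem.List.foldl_congr_mem _ _ _ _ (fun d k _ => pv_step_eq_modify d (pvSigner k) k)
  rw [hstep]
  set fo := (ks.map (fun k => (pvSigner k, k))).foldl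
      (fun (d : PySem.Dict String (List String)) p => d.modify p.1 [] (· ++ [p.2]))
      PySem.Dict.empty with hfo
  have hkeys : fo.keys = PySem.List.dedup (ks.map pvSigner) := by
    rw [hfo]
    have := PySem.Dict.keys_foldl_modify_key (κ := String) (ν := List String)
      (l := ks.map (fun k => (pvSigner k, k))) (key := fun p => p.1)
      (d0 := []) (f := fun _ p => (· ++ [p.2])) (d := PySem.Dict.empty)
    simp only [PySem.Dict.keys_empty] at this
    rw [this, PySem.Set.update_nil_left]
    simp [List.map_map, Function.comp_def]
  have hnd : fo.keys.Nodup := by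
    rw [hkeys]; exact PySem.List.nodup_dedup _
  have hget : ∀ s, fo.getD s [] = ks.filter (fun k => pvSigner k == s) := by
    intro s
    rw [hfo, PySem.Dict.getD_foldl_modify_append, PySem.Dict.getD_empty]
    rw [List.filter_map]
    simp [Function.comp_def, List.map_map]
  rw [PySem.Dict.items_eq_map_keys fo hnd []]
  rw [hkeys]
  exact List.map_congr_left (fun s _ => by rw [hget s])

-- ===== VERDICT (by name: the statement is the Claim_ definition above) =====
theorem create_signer_groups_spec : Claim_equal_create_signer_groups := by
  intro cd _
  show create_signer_groups cd = create_signer_groups_alt cd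
  unfold create_signer_groups create_signer_groups_alt
  exact pv_fold_eq _
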